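-- pv_equiv track=rewrite | github.com/Georgesorin/NumaiBiLED | Matrix/utils/states/play_state.py | _build_thick_border_one_lap
-- ===== SOURCE A (Python) =====
-- def _build_thick_border_one_lap(board_w, board_h, thickness):
--     """One clockwise lap; each step along the frame adds `thickness` deep pixels."""
--     w, h = board_w, board_h
--     t = thickness
--     pts = []
--     for x in range(w):
--         for k in range(t):
--             pts.append((x, k))
--     for y in range(t, h - t):
--         for k in range(t):
--             pts.append((w - 1 - k, y))
--     for x in range(w - 1, -1, -1):
--         for k in range(t):
--             pts.append((x, h - 1 - k))
--     for y in range(h - t - 1, t - 1, -1):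
--         for k in range(t):
--             pts.append((k, y))
--     return pts
-- ===== SOURCE B (Python) =====
-- def _build_thick_border_one_lap(board_w, board_h, thickness):
--     """One clockwise lap; each step along the frame adds `thickness` deep pixels."""
--     w, h, t = board_w, board_h, thickness
--     d = max(t, 0)
--     cols = max(w, 0)          # frame steps on the top edge (and on the bottom edge)
--     rows = max(h - 2 * t, 0)  # frame steps on the right edge (and on the left edge)
--
--     def pixel(i):
--         q, k = divmod(i, d)
--         if q < cols:
--             return (q, k)                       # top band, left to right
--         q -= cols
--         if q < rows:
--             return (w - 1 - k, t + q)           # right band, downwards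
--         q -= rows
--         if q < cols:
--             return (w - 1 - q, h - 1 - k)       # bottom band, right to left
--         q -= cols
--         return (k, h - t - 1 - q)                   # left band, upwards
--
--     return [pixel(i) for i in range(2 * (cols + rows) * d)]
-- ===== Notes on version B (the rewrite author's own statement) =====
-- stated objective: alternative
-- what changed: Replaces A's four side-by-side nested append loops with a single flat pass over range(total) that computes each pixel directly from its index by divmod arithmetic (closed-form indexing instead of nested perimeter iteration).
import Mathlib
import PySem

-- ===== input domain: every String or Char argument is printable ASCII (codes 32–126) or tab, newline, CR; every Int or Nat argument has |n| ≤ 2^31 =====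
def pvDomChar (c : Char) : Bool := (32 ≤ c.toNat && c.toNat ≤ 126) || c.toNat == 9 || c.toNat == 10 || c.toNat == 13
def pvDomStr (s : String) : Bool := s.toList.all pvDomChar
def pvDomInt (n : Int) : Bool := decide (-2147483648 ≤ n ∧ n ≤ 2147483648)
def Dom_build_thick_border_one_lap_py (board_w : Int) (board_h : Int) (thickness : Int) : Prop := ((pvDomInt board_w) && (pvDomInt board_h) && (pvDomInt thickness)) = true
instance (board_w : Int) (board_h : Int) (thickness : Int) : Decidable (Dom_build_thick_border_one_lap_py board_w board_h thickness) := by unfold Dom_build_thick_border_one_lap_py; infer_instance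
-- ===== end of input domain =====

-- B replaces A's four nested perimeter loops by one flat pass over all output indices,
-- computing each pixel directly from its index by divmod arithmetic (objective: alternative).

-- ===== PORT A =====
def build_thick_border_one_lap_py (board_w : Int) (board_h : Int) (thickness : Int) : List (Int × Int) :=
  let w := board_w
  let h := board_h
  let t := thickness
  let pts : List (Int × Int) := []
  let pts := (PySem.List.pyRange 0 w 1).foldl (fun pts x =>
    (PySem.List.pyRange 0 t 1).foldl (fun pts k => pts ++ [(x, k)]) pts) pts
  let pts := (PySem.List.pyRange t (h - t) 1).foldl (fun pts y =>
    (PySem.List.pyRange 0 t 1).foldl (fun pts k => pts ++ [(w - 1 - k, y)]) pts) pts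
  let pts := (PySem.List.pyRange (w - 1) (-1) (-1)).foldl (fun pts x =>
    (PySem.List.pyRange 0 t 1).foldl (fun pts k => pts ++ [(x, h - 1 - k)]) pts) pts
  let pts := (PySem.List.pyRange (h - t - 1) (t - 1) (-1)).foldl (fun pts y =>
    (PySem.List.pyRange 0 t 1).foldl (fun pts k => pts ++ [(k, y)]) pts) pts
  pts

-- ===== PORT B =====
-- B's inner closure `pixel`; its captured variables become explicit parameters.
def pv_pixel (w h t d cols rows : Int) (i : Int) : Int × Int :=
  let q := PySem.Int.floordiv i d
  let k := PySem.Int.mod i d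
  if q < cols then (q, k)
  else
    let q1 := q - cols
    if q1 < rows then (w - 1 - k, t + q1)
    else
      let q2 := q1 - rows
      if q2 < cols then (w - 1 - q2, h - 1 - k)
      else
        let q3 := q2 - cols
        (k, h - t - 1 - q3)

def build_thick_border_one_lap_py_alt (board_w : Int) (board_h : Int) (thickness : Int) : List (Int × Int) :=
  let w := board_w
  let h := board_h
  let t := thickness
  let d := max t 0
  let cols := max w 0
  let rows := max (h - 2 * t) 0
  (PySem.List.pyRange 0 (2 * (cols + rows) * d) 1).map (fun i => pv_pixel w h t d cols rows i)

-- ===== PRECONDITION & SPEC =====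
def Spec_build_thick_border_one_lap_py (board_w : Int) (board_h : Int) (thickness : Int) (out : List (Int × Int)) : Prop := out = build_thick_border_one_lap_py_alt board_w board_h thickness
instance (board_w : Int) (board_h : Int) (thickness : Int) (out : List (Int × Int)) : Decidable (Spec_build_thick_border_one_lap_py board_w board_h thickness out) := by unfold Spec_build_thick_border_one_lap_py; infer_instance

-- ===== CLAIM (what is proved, stated in full; the proofs are below) =====
def Claim_equal_build_thick_border_one_lap_py : Prop := ∀ (board_w : Int) (board_h : Int) (thickness : Int), Dom_build_thick_border_one_lap_py board_w board_h thickness → Spec_build_thick_border_one_lap_py board_w board_h thickness (build_thick_border_one_lap_py board_w board_h thickness)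

-- ===== LEMMAS AND PROOFS =====

-- the common normal form: four flatMap chunks over natural-number ranges
def pvT (w h t : Int) (cn rn dn : Nat) : List (Int × Int) :=
  ((List.range cn).flatMap fun (x : Nat) => (List.range dn).map fun (k : Nat) => ((x : Int), (k : Int)))
  ++ ((List.range rn).flatMap fun (j : Nat) => (List.range dn).map fun (k : Nat) => (w - 1 - (k : Int), t + (j : Int)))
  ++ ((List.range cn).flatMap fun (j : Nat) => (List.range dn).map fun (k : Nat) => (w - 1 - (j : Int), h - 1 - (k : Int)))
  ++ ((List.range rn).flatMap fun (j : Nat) => (List.range dn).map fun (k : Nat) => ((k : Int), h - t - 1 - (j : Int)))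

theorem pv_flatMap_congr {α β : Type} {l : List α} {f g : α → List β}
    (h : ∀ a ∈ l, f a = g a) : l.flatMap f = l.flatMap g := by
  simp only [List.flatMap_def]
  exact congrArg List.flatten (List.map_congr_left h)

theorem pv_range_mul_flatMap {α : Type} (n m : Nat) (f : Nat → α) :
    (List.range (n * m)).map f
      = (List.range n).flatMap (fun q => (List.range m).map (fun k => f (q * m + k))) := by
  induction n with
  | zero => simp
  | succ n ih =>
    rw [Nat.succ_mul, List.range_add, List.map_append, ih, List.range_succ,
      List.flatMap_append]
    simp [List.map_map, Function.comp, Nat.add_comm]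

theorem pv_div_mul_add (q k dn : Nat) (hk : k < dn) :
    (q * dn + k) / dn = q ∧ (q * dn + k) % dn = k := by
  constructor
  · rw [Nat.mul_comm q dn, Nat.mul_add_div (by omega), Nat.div_eq_of_lt hk]
    omega
  · rw [Nat.mul_comm q dn, Nat.mul_add_mod, Nat.mod_eq_of_lt hk]

theorem pv_pixel1 (w h t : Int) (cn rn dn q k : Nat) (hq : q < cn) (hk : k < dn) :
    pv_pixel w h t (dn : Int) (cn : Int) (rn : Int) ((q * dn + k : Nat) : Int)
      = ((q : Int), (k : Int)) := by
  obtain ⟨hd, hm⟩ := pv_div_mul_add q k dn hk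
  simp only [pv_pixel, PySem.Int.floordiv_natCast, PySem.Int.mod_natCast, hd, hm]
  rw [if_pos (by exact_mod_cast hq)]

theorem pv_pixel2 (w h t : Int) (cn rn dn q k : Nat) (hq : q < rn) (hk : k < dn) :
    pv_pixel w h t (dn : Int) (cn : Int) (rn : Int) (((cn + q) * dn + k : Nat) : Int)
      = (w - 1 - (k : Int), t + (q : Int)) := by
  obtain ⟨hd, hm⟩ := pv_div_mul_add (cn + q) k dn hk
  simp only [pv_pixel, PySem.Int.floordiv_natCast, PySem.Int.mod_natCast, hd, hm]
  rw [if_neg (by push_cast; omega), if_pos (by push_cast; omega)]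
  congr 1
  push_cast; omega

theorem pv_pixel3 (w h t : Int) (cn rn dn q k : Nat) (hq : q < cn) (hk : k < dn) :
    pv_pixel w h t (dn : Int) (cn : Int) (rn : Int) (((cn + rn + q) * dn + k : Nat) : Int)
      = (w - 1 - (q : Int), h - 1 - (k : Int)) := by
  obtain ⟨hd, hm⟩ := pv_div_mul_add (cn + rn + q) k dn hk
  simp only [pv_pixel, PySem.Int.floordiv_natCast, PySem.Int.mod_natCast, hd, hm]
  rw [if_neg (by push_cast; omega), if_neg (by push_cast; omega), if_pos (by push_cast; omega)]
  congr 2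
  push_cast; omega

theorem pv_pixel4 (w h t : Int) (cn rn dn q k : Nat) (hq : q < rn) (hk : k < dn) :
    pv_pixel w h t (dn : Int) (cn : Int) (rn : Int) (((cn + rn + cn + q) * dn + k : Nat) : Int)
      = ((k : Int), h - t - 1 - (q : Int)) := by
  obtain ⟨hd, hm⟩ := pv_div_mul_add (cn + rn + cn + q) k dn hk
  simp only [pv_pixel, PySem.Int.floordiv_natCast, PySem.Int.mod_natCast, hd, hm]
  rw [if_neg (by push_cast; omega), if_neg (by push_cast; omega), if_neg (by push_cast; omega)]
  congr 2
  push_cast; omega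

theorem pv_chunk_one {α : Type} (a b t : Int) (f : Int → Int → α) :
    (PySem.List.pyRange a b 1).flatMap (fun y => (PySem.List.pyRange 0 t 1).map (fun k => f y k))
      = (List.range (b - a).toNat).flatMap
          (fun (j : Nat) => (List.range t.toNat).map (fun (k : Nat) => f (a + (j : Int)) ((k : Int)))) := by
  rw [PySem.List.pyRange_one a b, PySem.List.pyRange_one 0 t]
  simp [List.flatMap_def, List.map_map, Function.comp_def]

theorem pv_chunk_neg {α : Type} (a b t : Int) (f : Int → Int → α) :
    (PySem.List.pyRange a b (-1)).flatMap (fun y => (PySem.List.pyRange 0 t 1).map (fun k => f y k))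
      = (List.range (a - b).toNat).flatMap
          (fun (j : Nat) => (List.range t.toNat).map (fun (k : Nat) => f (a - (j : Int)) ((k : Int)))) := by
  rw [PySem.List.pyRange_neg_one a b, PySem.List.pyRange_one 0 t]
  simp [List.flatMap_def, List.map_map, Function.comp_def]

theorem pvA_eq_T (w h t : Int) :
    build_thick_border_one_lap_py w h t
      = pvT w h t w.toNat (h - 2 * t).toNat t.toNat := by
  unfold build_thick_border_one_lap_py pvT
  simp only [PySem.List.foldl_append_singleton_eq_map, PySem.List.foldl_append_eq_flatMap,
    List.nil_append, List.append_assoc]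
  rw [pv_chunk_one 0 w t, pv_chunk_one t (h - t) t, pv_chunk_neg (w - 1) (-1) t,
    pv_chunk_neg (h - t - 1) (t - 1) t]
  rw [show w - 0 = w from by ring, show h - t - t = h - 2 * t from by ring,
    show w - 1 - -1 = w from by ring, show h - t - 1 - (t - 1) = h - 2 * t from by ring]
  simp [zero_add]

theorem pvB_eq_T (w h t : Int) :
    build_thick_border_one_lap_py_alt w h t
      = pvT w h t w.toNat (h - 2 * t).toNat t.toNat := by
  unfold build_thick_border_one_lap_py_alt
  dsimp only
  rw [← Int.toNat_eq_max t, ← Int.toNat_eq_max w, ← Int.toNat_eq_max (h - 2 * t)]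
  rw [show (2 : Int) * ((w.toNat : Int) + ((h - 2 * t).toNat : Int)) * (t.toNat : Int)
        = ((2 * (w.toNat + (h - 2 * t).toNat) * t.toNat : Nat) : Int) from by push_cast; ring]
  rw [PySem.List.pyRange_one]
  simp only [sub_zero, Int.toNat_natCast, List.map_map]
  rw [show 2 * (w.toNat + (h - 2 * t).toNat) * t.toNat
        = (w.toNat + (h - 2 * t).toNat + w.toNat + (h - 2 * t).toNat) * t.toNat from by ring]
  rw [pv_range_mul_flatMap]
  rw [show w.toNat + (h - 2 * t).toNat + w.toNat + (h - 2 * t).toNat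
        = w.toNat + ((h - 2 * t).toNat + (w.toNat + (h - 2 * t).toNat)) from by omega]
  simp only [List.range_add, List.flatMap_append, List.flatMap_map,
    Function.comp_def, zero_add]
  unfold pvT
  simp only [List.append_assoc]
  congr 1
  · apply pv_flatMap_congr
    intro q hq
    rw [List.mem_range] at hq
    apply List.map_congr_left
    intro k hk
    rw [List.mem_range] at hk
    exact pv_pixel1 w h t w.toNat (h - 2 * t).toNat t.toNat q k hq hk
  congr 1
  · apply pv_flatMap_congr
    intro q hq
    rw [List.mem_range] at hq
    apply List.map_congr_left
    intro k hk
    rw [List.mem_range] at hk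
    exact pv_pixel2 w h t w.toNat (h - 2 * t).toNat t.toNat q k hq hk
  congr 1
  · apply pv_flatMap_congr
    intro q hq
    rw [List.mem_range] at hq
    apply List.map_congr_left
    intro k hk
    rw [List.mem_range] at hk
    rw [show w.toNat + ((h - 2 * t).toNat + q) = w.toNat + (h - 2 * t).toNat + q from by omega]
    exact pv_pixel3 w h t w.toNat (h - 2 * t).toNat t.toNat q k hq hk
  · apply pv_flatMap_congr
    intro q hq
    rw [List.mem_range] at hq
    apply List.map_congr_left
    intro k hk
    rw [List.mem_range] at hk
    rw [show w.toNat + ((h - 2 * t).toNat + (w.toNat + q))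
          = w.toNat + (h - 2 * t).toNat + w.toNat + q from by omega]
    exact pv_pixel4 w h t w.toNat (h - 2 * t).toNat t.toNat q k hq hk

-- ===== VERDICT (by name: the statement is the Claim_ definition above) =====
theorem build_thick_border_one_lap_py_spec : Claim_equal_build_thick_border_one_lap_py := by
  intro w h t _
  unfold Spec_build_thick_border_one_lap_py
  rw [pvA_eq_T, pvB_eq_T]
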